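-- pv_equiv track=rewrite | github.com/RaviMishra-94/leet_sol | max_prod_diff.py | maxProductDifference
-- ===== SOURCE A (Python) =====
-- def maxProductDifference(nums: list[int]) -> int:
--     prod_list = []
--     n = len(nums)
--     for i in range(n):
--         for j in range(n):
--             if i != j:
--                 out = nums[i] * nums[j]
--                 prod_list.append(out)
--     return max(prod_list) - min(prod_list)
-- ===== SOURCE B (Python) =====
-- def maxProductDifference(nums: list[int]) -> int:
--     s = sorted(nums)
--     hi = max(s[-1] * s[-2], s[0] * s[1])
--     lo = min(s[0] * s[-1], s[0] * s[1], s[-1] * s[-2])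
--     return hi - lo
-- ===== Notes on version B (the rewrite author's own statement) =====
-- stated objective: faster
-- what changed: Replaced the O(n^2) enumeration of all pairwise products with a sort: the extreme pairwise products can only involve the two smallest and two largest elements, so B sorts once and combines four boundary elements.
-- outside the precondition, e.g. on maxProductDifference([]): A raises ValueError, B raises IndexError; on maxProductDifference([3]): A raises ValueError, B raises IndexError
import Mathlib
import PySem

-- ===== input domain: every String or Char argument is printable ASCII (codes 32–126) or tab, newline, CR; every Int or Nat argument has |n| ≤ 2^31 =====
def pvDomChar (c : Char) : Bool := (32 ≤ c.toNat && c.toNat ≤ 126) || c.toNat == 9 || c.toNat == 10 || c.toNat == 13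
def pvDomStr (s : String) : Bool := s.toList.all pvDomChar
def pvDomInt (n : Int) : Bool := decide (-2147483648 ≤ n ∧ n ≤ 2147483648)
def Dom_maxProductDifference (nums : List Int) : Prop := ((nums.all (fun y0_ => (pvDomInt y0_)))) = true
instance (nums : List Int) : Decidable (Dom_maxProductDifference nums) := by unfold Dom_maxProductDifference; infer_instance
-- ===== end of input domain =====

-- B sorts once and combines the two smallest and two largest elements instead of enumerating all n*(n-1) pairwise products.

-- ===== PORT A =====
-- the prod_list built by A's nested loops (append under 'if i != j')
def prodListA (nums : List Int) : List Int :=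
  (PySem.List.pyRange 0 nums.length 1).foldl (fun acc i =>
    (PySem.List.pyRange 0 nums.length 1).foldl (fun acc2 j =>
      if i ≠ j then acc2 ++ [PySem.List.pyGetD nums i 0 * PySem.List.pyGetD nums j 0] else acc2) acc) []

def maxProductDifference (nums : List Int) : Int :=
  ((PySem.List.max? (prodListA nums) (fun x => x)).getD 0) -
  ((PySem.List.min? (prodListA nums) (fun x => x)).getD 0)

-- ===== PORT B =====
def maxProductDifference_alt (nums : List Int) : Int :=
  let s := PySem.List.sorted nums (fun x => x) false
  max (PySem.List.pyGetD s (-1) 0 * PySem.List.pyGetD s (-2) 0)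
      (PySem.List.pyGetD s 0 0 * PySem.List.pyGetD s 1 0) -
  min (min (PySem.List.pyGetD s 0 0 * PySem.List.pyGetD s (-1) 0)
           (PySem.List.pyGetD s 0 0 * PySem.List.pyGetD s 1 0))
      (PySem.List.pyGetD s (-1) 0 * PySem.List.pyGetD s (-2) 0)

-- ===== PRECONDITION & SPEC =====
-- Pre_ excludes lists of fewer than two elements: there A's prod_list is empty and max([]) raises ValueError (B's s[-2] raises IndexError too).
def Pre_maxProductDifference (nums : List Int) : Prop := 2 ≤ nums.length
instance (nums : List Int) : Decidable (Pre_maxProductDifference nums) := by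
  unfold Pre_maxProductDifference; infer_instance
def pvWitness_maxProductDifference : List Int := [5, 6, 2, 7, 4]

def Spec_maxProductDifference (nums : List Int) (out : Int) : Prop := out = maxProductDifference_alt nums
instance (nums : List Int) (out : Int) : Decidable (Spec_maxProductDifference nums out) := by unfold Spec_maxProductDifference; infer_instance

-- ===== CLAIM (what is proved, stated in full; the proofs are below) =====
def Claim_equal_maxProductDifference : Prop := ∀ (nums : List Int), Dom_maxProductDifference nums → Pre_maxProductDifference nums → Spec_maxProductDifference nums (maxProductDifference nums)

-- ===== LEMMAS AND PROOFS =====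

-- "z is a product of two elements taken at distinct positions of l", in value form
def pairMem (l : List Int) (z : Int) : Prop :=
  ∃ x, x ∈ l ∧ ∃ y, y ∈ l.erase x ∧ z = x * y

theorem prodListA_eq (nums : List Int) :
    prodListA nums = (PySem.List.pyRange 0 nums.length 1).flatMap (fun i =>
      ((PySem.List.pyRange 0 nums.length 1).filter (fun j => decide ¬(i = j))).map
        (fun j => PySem.List.pyGetD nums i 0 * PySem.List.pyGetD nums j 0)) := by
  unfold prodListA
  simp only [ne_eq, PySem.List.foldl_append_ite, PySem.List.foldl_append_eq_flatMap,
    List.nil_append]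

theorem mem_prodListA {nums : List Int} {z : Int} :
    z ∈ prodListA nums ↔ ∃ i j : Nat, i < nums.length ∧ j < nums.length ∧ i ≠ j ∧
      z = nums.getD i 0 * nums.getD j 0 := by
  rw [prodListA_eq]
  simp only [List.mem_flatMap, List.mem_map, List.mem_filter, PySem.List.mem_pyRange_one]
  constructor
  · rintro ⟨i, ⟨hi0, hin⟩, j, ⟨⟨hj0, hjn⟩, hij⟩, rfl⟩
    refine ⟨i.toNat, j.toNat, by omega, by omega, by simp at hij; omega, ?_⟩
    rw [PySem.List.pyGetD_eq_getElem nums 0 hi0 hin, PySem.List.pyGetD_eq_getElem nums 0 hj0 hjn]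
    rw [List.getD_eq_getElem _ _ (by omega), List.getD_eq_getElem _ _ (by omega)]
  · rintro ⟨i, j, hi, hj, hij, rfl⟩
    refine ⟨(i : Int), ⟨by omega, by omega⟩, (j : Int), ⟨⟨by omega, by omega⟩, by simp; omega⟩, ?_⟩
    rw [PySem.List.pyGetD_eq_getElem nums 0 (by omega) (by exact_mod_cast (by omega : (i:Int) < (nums.length : Int))),
        PySem.List.pyGetD_eq_getElem nums 0 (by omega) (by exact_mod_cast (by omega : (j:Int) < (nums.length : Int)))]
    rw [List.getD_eq_getElem _ _ (by omega), List.getD_eq_getElem _ _ (by omega)]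
    simp

theorem two_le_count_of_getElem {l : List Int} {i j : Nat} (hi : i < l.length) (hj : j < l.length)
    (hij : i < j) (hv : l[i] = l[j]) : 2 ≤ l.count l[j] := by
  have hsplit : l = l.take (i+1) ++ l.drop (i+1) := (List.take_append_drop _ _).symm
  have h1 : l[j] ∈ l.take (i+1) := by
    rw [← hv]
    have : (l.take (i+1))[i]'(by simp; omega) = l[i] := List.getElem_take
    exact this ▸ List.getElem_mem _
  have h2 : l[j] ∈ l.drop (i+1) := by
    have : (l.drop (i+1))[j - (i+1)]'(by simp; omega) = l[j] := by
      rw [List.getElem_drop]; congr 1; omega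
    exact this ▸ List.getElem_mem _
  calc 2 ≤ (l.take (i+1)).count l[j] + (l.drop (i+1)).count l[j] := by
        have := List.count_pos_iff.mpr h1
        have := List.count_pos_iff.mpr h2
        omega
    _ = l.count l[j] := by rw [← List.count_append, ← hsplit]

theorem getD_mem_erase {l : List Int} {i j : Nat} (hi : i < l.length) (hj : j < l.length)
    (hij : i ≠ j) : l.getD j 0 ∈ l.erase (l.getD i 0) := by
  rw [List.getD_eq_getElem _ _ hi, List.getD_eq_getElem _ _ hj]
  rw [← List.count_pos_iff, List.count_erase]
  by_cases hv : l[i] = l[j]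
  · have : 2 ≤ l.count l[j] := by
      rcases Nat.lt_or_ge i j with h | h
      · exact two_le_count_of_getElem hi hj h hv
      · have hji : j < i := by omega
        have := two_le_count_of_getElem hj hi hji hv.symm
        rwa [hv] at this
    simp [hv]
    omega
  · have : 0 < l.count l[j] := List.count_pos_iff.mpr (List.getElem_mem _)
    simp [hv]

theorem pair_to_idx {l : List Int} {x y : Int} (hx : x ∈ l) (hy : y ∈ l.erase x) :
    ∃ i j : Nat, i < l.length ∧ j < l.length ∧ i ≠ j ∧ x = l.getD i 0 ∧ y = l.getD j 0 := by
  obtain ⟨l₁, l₂, _, hl, he⟩ := List.exists_erase_eq hx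
  rw [he] at hy
  have hxi : l.getD l₁.length 0 = x := by
    rw [List.getD_eq_getElem _ _ (by rw [hl]; simp)]
    subst hl
    rw [List.getElem_append_right (by omega)]
    simp
  rcases List.mem_append.mp hy with hmem | hmem
  · obtain ⟨k, hk, hky⟩ := List.mem_iff_getElem.mp hmem
    refine ⟨l₁.length, k, by rw [hl]; simp, by rw [hl]; simp; omega, by omega, hxi.symm, ?_⟩
    rw [List.getD_eq_getElem _ _ (by rw [hl]; simp; omega)]
    subst hl
    rw [List.getElem_append_left (by omega)]
    exact hky.symm
  · obtain ⟨k, hk, hky⟩ := List.mem_iff_getElem.mp hmem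
    refine ⟨l₁.length, l₁.length + 1 + k, by rw [hl]; simp, by rw [hl]; simp; omega, by omega,
      hxi.symm, ?_⟩
    rw [List.getD_eq_getElem _ _ (by rw [hl]; simp; omega)]
    subst hl
    rw [List.getElem_append_right (by omega)]
    simp only [List.getElem_cons]
    rw [dif_neg (by omega)]
    rw [← hky]
    congr 1
    omega

theorem pairMem_perm {l l' : List Int} {z : Int} (h : l.Perm l') (hp : pairMem l z) :
    pairMem l' z := by
  obtain ⟨x, hx, y, hy, hz⟩ := hp
  exact ⟨x, h.mem_iff.mp hx, y, (h.erase x).mem_iff.mp hy, hz⟩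

theorem mem_prodListA_iff_pairMem {nums : List Int} {z : Int} :
    z ∈ prodListA nums ↔ pairMem nums z := by
  rw [mem_prodListA]
  constructor
  · rintro ⟨i, j, hi, hj, hij, rfl⟩
    exact ⟨nums.getD i 0, by rw [List.getD_eq_getElem _ _ hi]; exact List.getElem_mem _,
           nums.getD j 0, getD_mem_erase hi hj hij, rfl⟩
  · rintro ⟨x, hx, y, hy, rfl⟩
    obtain ⟨i, j, hi, hj, hij, hxi, hyj⟩ := pair_to_idx hx hy
    exact ⟨i, j, hi, hj, hij, by rw [hxi, hyj]⟩

-- arithmetic cores (a ≤ b the two smallest, c ≤ d the two largest, x*y a pairwise product)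
theorem prod_upper {a b c d x y : Int} (hab : a ≤ b)
    (hbc : b ≤ c ∨ (a = c ∧ b = d)) (hax : a ≤ x) (hxy : x ≤ y) (hyd : y ≤ d)
    (hxc : x ≤ c) (hby : b ≤ y) : x * y ≤ max (d * c) (a * b) := by
  rcases le_or_gt 0 x with hx0 | hx0
  · exact le_max_of_le_left (by nlinarith)
  · rcases le_or_gt y 0 with hy0 | hy0
    · exact le_max_of_le_right (by nlinarith)
    · rcases le_or_gt 0 c with hc0 | hc0
      · exact le_max_of_le_left (by nlinarith)
      · rcases hbc with hbc | ⟨hac, hbd⟩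
        · exact le_max_of_le_right (by nlinarith)
        · exact le_max_of_le_right (by nlinarith)

theorem prod_lower {a b c d x y : Int} (hab : a ≤ b) (hcd : c ≤ d)
    (hax : a ≤ x) (hxy : x ≤ y) (hyd : y ≤ d)
    (hxc : x ≤ c) (hby : b ≤ y) : min (min (a * d) (a * b)) (d * c) ≤ x * y := by
  rcases le_or_gt 0 x with hx0 | hx0
  · rcases le_or_gt 0 a with ha0 | ha0
    · exact min_le_of_left_le (min_le_of_right_le (by nlinarith))
    · exact min_le_of_left_le (min_le_of_left_le (by nlinarith))
  · rcases le_or_gt y 0 with hy0 | hy0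
    · rcases le_or_gt c 0 with hc0 | hc0
      · exact min_le_of_right_le (by nlinarith)
      · exact min_le_of_left_le (min_le_of_left_le (by nlinarith))
    · exact min_le_of_left_le (min_le_of_left_le (by nlinarith))

theorem countP_gt_le_one {s : List Int}
    (hmono : ∀ p q : Nat, (hp : p < s.length) → (hq : q < s.length) → p ≤ q → s[p] ≤ s[q])
    (hn : 2 ≤ s.length) :
    s.countP (fun z => decide (s.getD (s.length - 2) 0 < z)) ≤ 1 := by
  set p := fun z => decide (s.getD (s.length - 2) 0 < z) with hp
  have hsplit : s = s.take (s.length - 1) ++ s.drop (s.length - 1) := (List.take_append_drop _ _).symm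
  have h1 : (s.take (s.length - 1)).countP p = 0 := by
    apply List.countP_eq_zero.mpr
    intro z hz
    obtain ⟨k, hk, hkz⟩ := List.mem_iff_getElem.mp hz
    simp only [List.length_take] at hk
    rw [List.getElem_take] at hkz
    have hc : s.getD (s.length - 2) 0 = s[s.length - 2]'(by omega) := List.getD_eq_getElem _ _ (by omega)
    have := hmono k (s.length - 2) (by omega) (by omega) (by omega)
    simp only [hp, decide_eq_true_eq, hc]
    omega
  have h2 : (s.drop (s.length - 1)).countP p ≤ 1 := by
    calc (s.drop (s.length - 1)).countP p ≤ (s.drop (s.length - 1)).length := List.countP_le_length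
      _ = 1 := by simp; omega
  calc s.countP p = (s.take (s.length - 1)).countP p + (s.drop (s.length - 1)).countP p := by
        rw [← List.countP_append, ← hsplit]
    _ ≤ 1 := by omega

theorem countP_lt_le_one {s : List Int}
    (hmono : ∀ p q : Nat, (hp : p < s.length) → (hq : q < s.length) → p ≤ q → s[p] ≤ s[q])
    (hn : 2 ≤ s.length) :
    s.countP (fun z => decide (z < s.getD 1 0)) ≤ 1 := by
  set p := fun z => decide (z < s.getD 1 0) with hp
  have hsplit : s = s.take 1 ++ s.drop 1 := (List.take_append_drop _ _).symm
  have h1 : (s.drop 1).countP p = 0 := by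
    apply List.countP_eq_zero.mpr
    intro z hz
    obtain ⟨k, hk, hkz⟩ := List.mem_iff_getElem.mp hz
    simp only [List.length_drop] at hk
    rw [List.getElem_drop] at hkz
    have hc : s.getD 1 0 = s[1]'(by omega) := List.getD_eq_getElem _ _ (by omega)
    have := hmono 1 (1 + k) (by omega) (by omega) (by omega)
    simp only [hp, decide_eq_true_eq, hc]
    omega
  have h2 : (s.take 1).countP p ≤ 1 := by
    calc (s.take 1).countP p ≤ (s.take 1).length := List.countP_le_length
      _ ≤ 1 := by simp
  calc s.countP p = (s.take 1).countP p + (s.drop 1).countP p := by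
        rw [← List.countP_append, ← hsplit]
    _ ≤ 1 := by omega

theorem pair_second_bounds {s : List Int} {x y : Int}
    (hmono : ∀ p q : Nat, (hp : p < s.length) → (hq : q < s.length) → p ≤ q → s[p] ≤ s[q])
    (hn : 2 ≤ s.length) (hx : x ∈ s) (hy : y ∈ s.erase x) :
    min x y ≤ s.getD (s.length - 2) 0 ∧ s.getD 1 0 ≤ max x y := by
  have hperm := List.perm_cons_erase hx
  constructor
  · rcases le_or_gt (min x y) (s.getD (s.length - 2) 0) with h | h
    · exact h
    exfalso
    set p := fun z => decide (s.getD (s.length - 2) 0 < z) with hp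
    have hpx : p x = true := decide_eq_true (lt_of_lt_of_le h (min_le_left x y))
    have hcount : s.countP p = 1 + (s.erase x).countP p := by
      rw [hperm.countP_eq, List.countP_cons, hpx]; simp [Nat.add_comm]
    have hpy : 0 < (s.erase x).countP p :=
      List.countP_pos_iff.mpr ⟨y, hy, decide_eq_true (lt_of_lt_of_le h (min_le_right x y))⟩
    have := countP_gt_le_one hmono hn
    rw [hcount] at this
    omega
  · rcases le_or_gt (s.getD 1 0) (max x y) with h | h
    · exact h
    exfalso
    set p := fun z => decide (z < s.getD 1 0) with hp
    have hpx : p x = true := decide_eq_true (lt_of_le_of_lt (le_max_left x y) h)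
    have hcount : s.countP p = 1 + (s.erase x).countP p := by
      rw [hperm.countP_eq, List.countP_cons, hpx]; simp [Nat.add_comm]
    have hpy : 0 < (s.erase x).countP p :=
      List.countP_pos_iff.mpr ⟨y, hy, decide_eq_true (lt_of_le_of_lt (le_max_right x y) h)⟩
    have := countP_lt_le_one hmono hn
    rw [hcount] at this
    omega

theorem mem_sorted_bounds {s : List Int} {x : Int}
    (hmono : ∀ p q : Nat, (hp : p < s.length) → (hq : q < s.length) → p ≤ q → s[p] ≤ s[q])
    (hn : 2 ≤ s.length) (hx : x ∈ s) :
    s.getD 0 0 ≤ x ∧ x ≤ s.getD (s.length - 1) 0 := by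
  obtain ⟨k, hk, hkx⟩ := List.mem_iff_getElem.mp hx
  rw [List.getD_eq_getElem _ _ (by omega), List.getD_eq_getElem _ _ (by omega)]
  exact ⟨hkx ▸ hmono 0 k (by omega) hk (by omega),
         hkx ▸ hmono k (s.length - 1) hk (by omega) (by omega)⟩

-- ===== VERDICT (by name: the statement is the Claim_ definition above) =====
theorem maxProductDifference_spec : Claim_equal_maxProductDifference := by
  intro nums _ hpre
  unfold Pre_maxProductDifference at hpre
  unfold Spec_maxProductDifference
  set s := PySem.List.sorted nums (fun x => x) false with hs
  have hlen : s.length = nums.length := PySem.List.length_sorted nums _ false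
  have hn : 2 ≤ s.length := by omega
  have hperm : s.Perm nums := PySem.List.sorted_perm nums _ false
  have hmono : ∀ p q : Nat, (hp : p < s.length) → (hq : q < s.length) → p ≤ q → s[p] ≤ s[q] := by
    intro p q hp hq hpq
    exact PySem.List.sorted_id_getElem_mono nums hpq hq
  set a := s.getD 0 0 with ha
  set b := s.getD 1 0 with hb
  set c := s.getD (s.length - 2) 0 with hc
  set d := s.getD (s.length - 1) 0 with hd
  have hab : a ≤ b := by
    rw [ha, hb, List.getD_eq_getElem _ _ (by omega), List.getD_eq_getElem _ _ (by omega)]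
    exact hmono 0 1 (by omega) (by omega) (by omega)
  have hcd : c ≤ d := by
    rw [hc, hd, List.getD_eq_getElem _ _ (by omega), List.getD_eq_getElem _ _ (by omega)]
    exact hmono _ _ (by omega) (by omega) (by omega)
  have hbc : b ≤ c ∨ (a = c ∧ b = d) := by
    rcases Nat.lt_or_ge s.length 3 with h3 | h3
    · right
      constructor
      · rw [ha, hc]; congr 1; omega
      · rw [hb, hd]; congr 1; omega
    · left
      rw [hb, hc, List.getD_eq_getElem _ _ (by omega), List.getD_eq_getElem _ _ (by omega)]
      exact hmono 1 (s.length - 2) (by omega) (by omega) (by omega)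
  -- candidate products are pairwise products of nums
  have hidx : ∀ i j : Nat, i < s.length → j < s.length → i ≠ j →
      s.getD i 0 * s.getD j 0 ∈ prodListA nums := by
    intro i j hi hj hij
    apply mem_prodListA_iff_pairMem.mpr
    apply pairMem_perm hperm
    exact ⟨s.getD i 0, by rw [List.getD_eq_getElem _ _ hi]; exact List.getElem_mem _,
           s.getD j 0, getD_mem_erase hi hj hij, rfl⟩
  -- every pairwise product is bounded by the candidates
  have hub : ∀ z ∈ prodListA nums, z ≤ max (d * c) (a * b) := by
    intro z hz
    obtain ⟨x, hx, y, hy, rfl⟩ := pairMem_perm hperm.symm (mem_prodListA_iff_pairMem.mp hz)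
    obtain ⟨hax, hxd⟩ := mem_sorted_bounds hmono hn hx
    obtain ⟨hay, hyd⟩ := mem_sorted_bounds hmono hn (List.mem_of_mem_erase hy)
    obtain ⟨hminc, hbmax⟩ := pair_second_bounds hmono hn hx hy
    have := prod_upper hab hbc (le_min hax hay) (min_le_max (a := x) (b := y))
      (max_le hxd hyd) hminc hbmax
    rwa [min_mul_max] at this
  have hlb : ∀ z ∈ prodListA nums, min (min (a * d) (a * b)) (d * c) ≤ z := by
    intro z hz
    obtain ⟨x, hx, y, hy, rfl⟩ := pairMem_perm hperm.symm (mem_prodListA_iff_pairMem.mp hz)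
    obtain ⟨hax, hxd⟩ := mem_sorted_bounds hmono hn hx
    obtain ⟨hay, hyd⟩ := mem_sorted_bounds hmono hn (List.mem_of_mem_erase hy)
    obtain ⟨hminc, hbmax⟩ := pair_second_bounds hmono hn hx hy
    have := prod_lower hab hcd (le_min hax hay) (min_le_max (a := x) (b := y))
      (max_le hxd hyd) hminc hbmax
    rwa [min_mul_max] at this
  -- the candidates are attained
  have hdc : d * c ∈ prodListA nums := hidx _ _ (by omega) (by omega) (by omega)
  have habm : a * b ∈ prodListA nums := hidx 0 1 (by omega) (by omega) (by omega)
  have hadm : a * d ∈ prodListA nums := hidx 0 _ (by omega) (by omega) (by omega)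
  have hMmem : max (d * c) (a * b) ∈ prodListA nums := by
    rcases max_choice (d * c) (a * b) with h | h <;> rw [h] <;> assumption
  have hmmem : min (min (a * d) (a * b)) (d * c) ∈ prodListA nums := by
    rcases min_choice (min (a * d) (a * b)) (d * c) with h | h <;> rw [h]
    · rcases min_choice (a * d) (a * b) with h' | h' <;> rw [h'] <;> assumption
    · assumption
  -- so max? / min? return exactly the candidates
  obtain ⟨M, hM⟩ : ∃ M, PySem.List.max? (prodListA nums) (fun x => x) = some M := by
    cases hq : PySem.List.max? (prodListA nums) (fun x => x) with
    | none => exact absurd ((PySem.List.max?_eq_none_iff _ _).mp hq) (List.ne_nil_of_mem hMmem)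
    | some M => exact ⟨M, rfl⟩
  obtain ⟨m, hm⟩ : ∃ m, PySem.List.min? (prodListA nums) (fun x => x) = some m := by
    cases hq : PySem.List.min? (prodListA nums) (fun x => x) with
    | none => exact absurd ((PySem.List.min?_eq_none_iff _ _).mp hq) (List.ne_nil_of_mem hMmem)
    | some m => exact ⟨m, rfl⟩
  have hMeq : M = max (d * c) (a * b) :=
    le_antisymm (hub M (PySem.List.max?_mem hM)) (PySem.List.max?_isMax hM _ hMmem)
  have hmeq : m = min (min (a * d) (a * b)) (d * c) :=
    le_antisymm (PySem.List.min?_isMin hm _ hmmem) (hlb m (PySem.List.min?_mem hm))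
  -- evaluate both ports
  unfold maxProductDifference
  rw [hM, hm]
  simp only [Option.getD_some, hMeq, hmeq]
  simp only [maxProductDifference_alt]
  rw [← hs]
  rw [PySem.List.pyGetD_neg_ofNat s 1 0 (by omega) (by omega),
      PySem.List.pyGetD_neg_ofNat s 2 0 (by omega) (by omega),
      PySem.List.pyGetD_zero,
      show ((1 : Int)) = ((1 : Nat) : Int) from rfl,
      PySem.List.pyGetD_natCast s 1 0]
  rw [← hb, ← List.getD_eq_getElem s 0 (by omega), ← List.getD_eq_getElem s 0 (by omega), ← ha,
      ← hc, ← hd]
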